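-- pv_equiv track=rewrite | github.com/katherineblake/language-scripts | transliterate.py | liaison
-- ===== SOURCE A (Python) =====
-- special_char_dict = {
-- 'A' : ['ʔa', 'a:', 'a'], #ʔa is word-initial, a after prefixes, a: elsewhere
-- 'p' : ['T','t',''], #surface [t] before vowels only
-- 'w' : ['w',':'],   #long vowel in the environment u_C, elsewhere: w
-- 'y' : ['j',':'],   #long vowel in the environment i_C, elsewhere: j
-- }
--
-- vowel_initial = ['a','a:','i','i:','u','u:','e','e:','an','in','un']
--
-- def liaison(pseudo_ipa):
--     '''
--     Iterate over pseudo-IPA to replace 'p' Buckwalter character,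
--     which is realized as [t] before vowels at morpheme- and word-boundaries.
--     Changes 'p' to 't' word-internally and 'T' word-finally.
--     Returns updated form.
--     '''
--     ipa = ''
--     for i,char in enumerate(pseudo_ipa):
--         if char == 'p':
--         # surface [t] before vowels
--             if i == len(pseudo_ipa)-1:
--             # realization of word-final 'p' depends on onset of following word
--             # 'T' used as placeholder
--                 ipa += special_char_dict[char][0]
--             else:
--                 if pseudo_ipa[i+1] in vowel_initial:
--                     ipa += special_char_dict[char][1]
--                 else:
--                     ipa += special_char_dict[char][2]
--         else:
--             ipa += char
--
--     return ipa
-- ===== SOURCE B (Python) =====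
-- def liaison(pseudo_ipa):
--     '''Two staged rewrites instead of a scan: fix a word-final p to T first,
--     then split the string on p and rejoin, prefixing each following segment
--     with t exactly when it starts with a vowel letter.'''
--     if pseudo_ipa.endswith('p'):
--         pseudo_ipa = pseudo_ipa[:-1] + 'T'
--     parts = pseudo_ipa.split('p')
--     return parts[0] + ''.join('t' + seg if seg[:1] in ('a', 'i', 'u', 'e') else seg
--                               for seg in parts[1:])
-- ===== Notes on version B (the rewrite author's own statement) =====
-- stated objective: faster
-- what changed: Replaces A's indexed per-character scan (enumerate loop with dict lookups, an i+1 lookahead and string concatenation) by staged whole-string rewriting: first rewrite a word-final p to T, then split the string on p and rejoin the segments, prefixing a segment with t exactly when it starts with a vowel letter.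
import Mathlib
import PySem

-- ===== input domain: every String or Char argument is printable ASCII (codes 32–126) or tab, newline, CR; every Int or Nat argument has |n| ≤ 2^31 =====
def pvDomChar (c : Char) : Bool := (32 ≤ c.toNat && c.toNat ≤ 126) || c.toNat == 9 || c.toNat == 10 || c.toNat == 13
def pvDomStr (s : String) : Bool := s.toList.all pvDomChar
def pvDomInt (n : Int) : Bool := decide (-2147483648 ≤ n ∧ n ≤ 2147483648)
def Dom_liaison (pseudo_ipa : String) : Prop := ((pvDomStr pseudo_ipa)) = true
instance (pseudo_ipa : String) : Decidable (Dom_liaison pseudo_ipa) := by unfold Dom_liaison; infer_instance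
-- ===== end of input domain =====

-- B replaces A's indexed per-character scan (enumerate loop, dict lookups, i+1 lookahead,
-- string concatenation) by staged whole-string rewriting: fix a word-final p to T, then
-- split on p and rejoin, prefixing vowel-initial segments with t; measured faster.

-- ===== PORT A =====
def specialCharP : List String := ["T", "t", ""]   -- special_char_dict['p']

def vowelInitial : List String :=
  ["a", "a:", "i", "i:", "u", "u:", "e", "e:", "an", "in", "un"]

-- loop body of A: ipa += … for each (char, i) of enumerate(pseudo_ipa)
def liaisonStep (l : List Char) (ipa : List Char) (p : Char × Nat) : List Char :=
  if p.1 = 'p' then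
    if p.2 = l.length - 1 then ipa ++ (specialCharP[0]!).toList
    else
      -- pseudo_ipa[i+1] is in range here (i < len-1), so getElem? is some
      match l[p.2 + 1]? with
      | some n => if vowelInitial.contains (String.ofList [n]) then ipa ++ (specialCharP[1]!).toList
                  else ipa ++ (specialCharP[2]!).toList
      | none => ipa
  else ipa ++ [p.1]

def liaison (pseudo_ipa : String) : String :=
  let l := pseudo_ipa.toList
  String.ofList ((l.zipIdx).foldl (liaisonStep l) [])

-- ===== PORT B =====
-- the per-segment rewrite of Source B's join: 't' + seg if seg[:1] in ('a','i','u','e') else seg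
-- (seg[:1] on a list of chars is `take 1`, exact)
def liaisonSeg (seg : List Char) : List Char :=
  if seg.take 1 ∈ [['a'], ['i'], ['u'], ['e']] then 't' :: seg else seg

def liaison_alt (pseudo_ipa : String) : String :=
  let cs := pseudo_ipa.toList
  -- stage 1: if pseudo_ipa.endswith('p'): pseudo_ipa = pseudo_ipa[:-1] + 'T'
  let cs := if cs.getLast? = some 'p' then cs.dropLast ++ ['T'] else cs
  -- stage 2: parts = pseudo_ipa.split('p'); parts[0] + ''.join(…)
  match PySem.Chars.splitOn cs ['p'] with
  | [] => ""   -- unreachable: str.split never returns an empty list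
  | p0 :: rest => String.ofList (p0 ++ (rest.map liaisonSeg).flatten)

-- ===== PRECONDITION & SPEC =====
def Spec_liaison (pseudo_ipa : String) (out : String) : Prop := out = liaison_alt pseudo_ipa
instance (pseudo_ipa : String) (out : String) : Decidable (Spec_liaison pseudo_ipa out) := by unfold Spec_liaison; infer_instance

-- ===== CLAIM (what is proved, stated in full; the proofs are below) =====
def Claim_equal_liaison : Prop := ∀ (pseudo_ipa : String), Dom_liaison pseudo_ipa → Spec_liaison pseudo_ipa (liaison pseudo_ipa)

-- ===== LEMMAS AND PROOFS =====

-- A's pass on a suffix, as one function of the suffix (lookahead form)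
def liaisonSub (c : Char) (nxt : Option Char) : List Char :=
  if c ≠ 'p' then [c]
  else
    match nxt with
    | none => ['T']
    | some n => if ['a', 'i', 'u', 'e'].contains n then ['t'] else []

def bPass (cs : List Char) : List Char :=
  ((cs.zip ((cs.drop 1).map some ++ [none])).map (fun p => liaisonSub p.1 p.2)).flatten

lemma bPass_cons (c n : Char) (rest : List Char) :
    bPass (c :: n :: rest) = liaisonSub c (some n) ++ bPass (n :: rest) := rfl

lemma bPass_single (c : Char) : bPass [c] = liaisonSub c none := by
  simp [bPass, liaisonSub]

lemma ofList_one_eq (n : Char) (s : String) : (String.ofList [n] = s) ↔ [n] = s.toList := by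
  constructor
  · intro h; have := congrArg String.toList h; simpa using this
  · intro h; rw [h, String.ofList_toList]

lemma vowel_bridge (n : Char) :
    vowelInitial.contains (String.ofList [n]) = (['a', 'i', 'u', 'e'].contains n) := by
  simp only [vowelInitial, List.contains_eq_mem, decide_eq_decide, List.mem_cons,
    List.not_mem_nil, or_false, ofList_one_eq]
  simp

lemma loop_eq_bPass (l : List Char) :
    ∀ (suf : List Char) (k : Nat) (acc : List Char), l.drop k = suf →
      (suf.zipIdx k).foldl (liaisonStep l) acc = acc ++ bPass suf := by
  intro suf
  induction suf with
  | nil => intro k acc _; simp [bPass]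
  | cons c rest ih =>
    intro k acc hdrop
    have hk : k < l.length := by
      by_contra h
      have : l.drop k = [] := List.drop_eq_nil_of_le (by omega)
      rw [this] at hdrop; exact (List.cons_ne_nil _ _) hdrop.symm
    have hlen : l.length = k + (c :: rest).length := by
      have := List.length_drop (l := l) (i := k)
      rw [hdrop] at this; omega
    have hdrop1 : l.drop (k + 1) = rest := by
      rw [← List.tail_drop, hdrop]; rfl
    have hnext : l[k + 1]? = rest.head? := by
      rw [← List.getElem?_drop, hdrop]
      cases rest <;> rfl
    have hstep : (c :: rest).zipIdx k = (c, k) :: rest.zipIdx (k + 1) := by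
      simp [List.zipIdx_cons]
    rw [hstep, List.foldl_cons]
    cases rest with
    | nil =>
      have hfin : k = l.length - 1 := by simp at hlen; omega
      simp only [List.zipIdx_nil, List.foldl_nil, liaisonStep, hfin]
      by_cases hc : c = 'p'
      · simp [hc, bPass_single, liaisonSub, specialCharP]
      · simp [hc, bPass_single, liaisonSub]
    | cons n rest' =>
      have hnotfin : ¬ (k = l.length - 1) := by simp at hlen; omega
      have ihr := ih (k + 1) (liaisonStep l acc (c, k)) hdrop1
      rw [ihr, bPass_cons, ← List.append_assoc]
      congr 1
      by_cases hc : c = 'p'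
      · simp only [liaisonStep, liaisonSub, hc, if_neg hnotfin, hnext,
          List.head?_cons, vowel_bridge, specialCharP]
        by_cases hv : (['a', 'i', 'u', 'e'].contains n) = true
        · rw [if_pos hv, if_pos hv]; rfl
        · rw [if_neg hv, if_neg hv]; simp
      · simp [liaisonStep, liaisonSub, hc]

-- reference split on 'p' (simple structural recursion)
def mySplit : List Char → List (List Char)
  | [] => [[]]
  | c :: r => if c = 'p' then [] :: mySplit r else (mySplit r).modifyHead (c :: ·)

lemma mySplit_ne_nil (cs : List Char) : mySplit cs ≠ [] := by
  induction cs with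
  | nil => simp [mySplit]
  | cons c r ih =>
    simp only [mySplit]
    split_ifs
    · simp
    · cases h : mySplit r with
      | nil => exact absurd h ih
      | cons a b => simp [List.modifyHead]

-- invariant of PySem.Chars.splitOn.go for the one-char separator 'p'
lemma go_eq_mySplit :
    ∀ (fuel : Nat) (l cur : List Char) (acc : List (List Char)), l.length ≤ fuel →
      PySem.Chars.splitOn.go ['p'] fuel l cur acc
        = acc.reverse ++ (mySplit l).modifyHead (cur.reverse ++ ·) := by
  intro fuel
  induction fuel with
  | zero =>
    intro l cur acc h
    have : l = [] := List.eq_nil_of_length_eq_zero (by omega)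
    subst this
    simp [PySem.Chars.splitOn.go, mySplit, List.modifyHead]
  | succ f ih =>
    intro l cur acc h
    cases l with
    | nil => simp [PySem.Chars.splitOn.go, mySplit, List.modifyHead]
    | cons c rest =>
      by_cases hc : c = 'p'
      · subst hc
        have hpre : List.isPrefixOf ['p'] ('p' :: rest) = true := by
          simp [List.isPrefixOf]
        rw [PySem.Chars.splitOn.go]
        simp only [hpre, if_pos]
        have hd : List.drop (['p'] : List Char).length ('p' :: rest) = rest := rfl
        rw [hd]
        have := ih rest [] (cur.reverse :: acc) (by simpa using Nat.le_of_succ_le_succ h)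
        rw [this]
        cases hms2 : mySplit rest with
        | nil => exact absurd hms2 (mySplit_ne_nil rest)
        | cons a b => simp [mySplit, List.modifyHead, hms2]
      · have hpre : List.isPrefixOf ['p'] (c :: rest) = false := by
          simp only [List.isPrefixOf, Bool.and_eq_false_iff, beq_eq_false_iff_ne, ne_eq]
          exact Or.inl (Ne.symm hc)
        rw [PySem.Chars.splitOn.go]
        simp only [hpre, Bool.false_eq_true, if_neg, not_false_iff]
        have := ih rest (c :: cur) acc (by simpa using Nat.le_of_succ_le_succ h)
        rw [this]
        simp only [mySplit, if_neg hc]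
        cases hms : mySplit rest with
        | nil => exact absurd hms (mySplit_ne_nil rest)
        | cons hh tt => simp [List.modifyHead]

lemma splitOn_eq_mySplit (cs : List Char) :
    PySem.Chars.splitOn cs ['p'] = mySplit cs := by
  have := go_eq_mySplit (cs.length + 1) cs [] [] (by omega)
  rw [PySem.Chars.splitOn, this]
  cases h : mySplit cs with
  | nil => exact absurd h (mySplit_ne_nil cs)
  | cons a b => simp [List.modifyHead]

-- the replacement at a p-boundary, as a function of what follows
def pRep : List Char → List Char
  | n :: _ => if ['a', 'i', 'u', 'e'].contains n then ['t'] else []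
  | [] => []

-- middle-only pass: lookahead rule, a trailing p is deleted
def mPass : List Char → List Char
  | [] => []
  | c :: r => (if c = 'p' then pRep r else [c]) ++ mPass r

-- head shape of mySplit
lemma mySplit_head_take (r : List Char) :
    ((mySplit r).headI).take 1 = r.take 1 ∨ (mySplit r).headI = [] := by
  cases r with
  | nil => right; simp [mySplit]
  | cons c t =>
    by_cases hc : c = 'p'
    · right; simp [mySplit, hc]
    · left
      simp only [mySplit, if_neg hc]
      cases hms : mySplit t with
      | nil => exact absurd hms (mySplit_ne_nil t)
      | cons hh tt => simp [List.modifyHead]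

-- the rewrite flag of liaisonSeg on mySplit's head segment equals the vowel test on r
lemma seg_flag (r : List Char) (hh : List Char) (tt : List (List Char))
    (hms : mySplit r = hh :: tt) :
    liaisonSeg hh = pRep r ++ hh := by
  have hhead : hh.take 1 = r.take 1 ∨ hh = [] := by
    have := mySplit_head_take r
    rw [hms] at this; simpa [List.headI] using this
  unfold liaisonSeg
  cases r with
  | nil =>
    rcases hhead with h | h
    · simp at h; simp [h, pRep]
    · simp [h, pRep]
  | cons n t =>
    by_cases hn : n = 'p'
    · have hh0 : hh = [] := by
        have h1 : mySplit (n :: t) = [] :: mySplit t := by simp [mySplit, hn]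
        rw [h1] at hms
        exact ((List.cons.injEq _ _ _ _).mp hms).1.symm
      subst hn
      simp [hh0, pRep]
    · have hh1 : ∃ a, hh = n :: a := by
        have h1 : mySplit (n :: t) = (mySplit t).modifyHead (n :: ·) := by
          simp [mySplit, hn]
        rw [h1] at hms
        cases hmt : mySplit t with
        | nil => exact absurd hmt (mySplit_ne_nil t)
        | cons a b =>
          rw [hmt] at hms
          simp only [List.modifyHead] at hms
          exact ⟨a, ((List.cons.injEq _ _ _ _).mp hms).1.symm⟩
      obtain ⟨a, ha⟩ := hh1
      subst ha
      simp only [pRep, List.take_succ_cons, List.take_zero]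
      by_cases hv : (['a', 'i', 'u', 'e'].contains n) = true
      · have hm : [n] ∈ [['a'], ['i'], ['u'], ['e']] := by
          simp only [List.contains_eq_mem, decide_eq_true_eq] at hv
          simp only [List.mem_cons, List.not_mem_nil, or_false] at hv ⊢
          rcases hv with h | h | h | h <;> simp [h]
        rw [if_pos hm, if_pos hv]; rfl
      · have hm : ¬ ([n] ∈ [['a'], ['i'], ['u'], ['e']]) := by
          simp only [List.contains_eq_mem, decide_eq_true_eq] at hv
          simp only [List.mem_cons, List.not_mem_nil, or_false]
          intro h
          exact hv (by rcases h with h | h | h | h <;> simp_all)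
        rw [if_neg hm, if_neg hv]; rfl

lemma reconstruct_eq_mPass (cs : List Char) :
    (mySplit cs).headI ++ (((mySplit cs).tail).map liaisonSeg).flatten = mPass cs := by
  induction cs with
  | nil => simp [mySplit, mPass]
  | cons c r ih =>
    by_cases hc : c = 'p'
    · subst hc
      have hsp : mySplit ('p' :: r) = [] :: mySplit r := by simp [mySplit]
      have hmp : mPass ('p' :: r) = pRep r ++ mPass r := by simp [mPass]
      rw [hsp, hmp]
      cases hms : mySplit r with
      | nil => exact absurd hms (mySplit_ne_nil r)
      | cons hh tt =>
        rw [hms] at ih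
        simp only [List.headI, List.tail] at ih
        simp only [List.headI, List.tail, List.map_cons, List.flatten_cons, List.nil_append]
        rw [seg_flag r hh tt hms, List.append_assoc, ih]
    · have hsp : mySplit (c :: r) = (mySplit r).modifyHead (c :: ·) := by
        simp [mySplit, hc]
      have hmp : mPass (c :: r) = [c] ++ mPass r := by simp [mPass, hc]
      rw [hsp, hmp]
      cases hms : mySplit r with
      | nil => exact absurd hms (mySplit_ne_nil r)
      | cons hh tt =>
        rw [hms] at ih
        simp only [List.headI, List.tail] at ih
        simp only [List.modifyHead, List.headI, List.tail, List.cons_append]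
        rw [ih]
        simp

-- the staged pass on the fixed-up string equals A's lookahead pass
lemma mPass_eq_bPass_no_final_p :
    ∀ (cs : List Char), cs.getLast? ≠ some 'p' → mPass cs = bPass cs := by
  intro cs
  induction cs with
  | nil => intro _; simp [mPass, bPass]
  | cons c r ih =>
    intro hlast
    cases r with
    | nil =>
      have hc : c ≠ 'p' := by simpa using hlast
      simp [mPass, bPass_single, liaisonSub, hc]
    | cons n t =>
      have hlast' : (n :: t).getLast? ≠ some 'p' := by
        simpa [List.getLast?_cons_cons] using hlast
      rw [bPass_cons, ← ih hlast']
      simp only [mPass, liaisonSub, pRep]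
      by_cases hc : c = 'p' <;> simp [hc]

lemma mPass_fix_final_p :
    ∀ (ds : List Char), mPass (ds ++ ['T']) = bPass (ds ++ ['p']) := by
  intro ds
  induction ds with
  | nil => simp [mPass, bPass_single, liaisonSub]
  | cons c r ih =>
    have hb : bPass ((c :: r) ++ ['p'])
        = liaisonSub c (((r ++ ['p']).head?).getD 'p') ++ bPass (r ++ ['p']) := by
      cases r with
      | nil => simpa using bPass_cons c 'p' []
      | cons n t => simpa using bPass_cons c n (t ++ ['p'])
    rw [List.cons_append, hb, ← ih]
    simp only [mPass, liaisonSub, pRep]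
    by_cases hc : c = 'p'
    · subst hc
      cases r with
      | nil => simp
      | cons n t => simp
    · simp [hc]

lemma fix_eq : ∀ (cs : List Char),
    mPass (if cs.getLast? = some 'p' then cs.dropLast ++ ['T'] else cs) = bPass cs := by
  intro cs
  by_cases h : cs.getLast? = some 'p'
  · rw [if_pos h]
    have hcs : cs = cs.dropLast ++ ['p'] := by
      have := List.dropLast_append_getLast? 'p' h
      simpa using this.symm
    calc mPass (cs.dropLast ++ ['T']) = bPass (cs.dropLast ++ ['p']) :=
          mPass_fix_final_p cs.dropLast
      _ = bPass cs := by rw [← hcs]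
  · rw [if_neg h]; exact mPass_eq_bPass_no_final_p cs h

-- ===== VERDICT (by name: the statement is the Claim_ definition above) =====
theorem liaison_spec : Claim_equal_liaison := by
  intro s _
  unfold Spec_liaison liaison liaison_alt
  simp only []
  have hA := loop_eq_bPass s.toList s.toList 0 [] (by simp)
  rw [hA, List.nil_append]
  set cs := if s.toList.getLast? = some 'p' then s.toList.dropLast ++ ['T'] else s.toList with hcs
  rw [splitOn_eq_mySplit]
  have hne := mySplit_ne_nil cs
  cases hms : mySplit cs with
  | nil => exact absurd hms hne
  | cons p0 rest =>
    have hrec := reconstruct_eq_mPass cs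
    rw [hms] at hrec
    simp only [List.headI, List.tail] at hrec
    have hfix := fix_eq s.toList
    rw [← hcs] at hfix
    show String.ofList (bPass s.toList) = String.ofList (p0 ++ (List.map liaisonSeg rest).flatten)
    rw [hrec, hfix]
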